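-- pv_equiv track=rewrite | github.com/MartinTous/IA2 | TP1/ejercicio2/main.py | almacen
-- ===== SOURCE A (Python) =====
-- def almacen(matriz,dim):
--     PF=0             #Pasillo filas
--     PC=0             #Pasillos columnas
--     estante=0
--     for i in range(0,dim):
--         matriz.append([0]*dim)
--
--     for i in range(0,dim):
--         for j in range(0,dim):
--             if PF==0:
--                 matriz[i][j]=0
--             elif PC==0:
--                 matriz[i][j]=0
--             else:
--                 estante=estante+1
--                 matriz[i][j]=estante
--             PC=PC+1
--             if PC==3:
--                 PC=0
--         PF=PF+1
--         PC=0
--         if PF==5: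
--             PF=0
--     return matriz
-- ===== SOURCE B (Python) =====
-- def almacen(matriz, dim):
--     for _ in range(dim):
--         matriz.append([0] * dim)
--     shelf_cols = dim - (dim + 2) // 3      # shelf (non-aisle) columns per row
--     for i in range(dim):
--         for j in range(dim):
--             if i % 5 == 0 or j % 3 == 0:
--                 matriz[i][j] = 0
--             else:
--                 rows_before = i - (i + 4) // 5     # shelf rows above i
--                 matriz[i][j] = shelf_cols * rows_before + (j - j // 3)
--     return matriz
-- ===== Notes on version B (the rewrite author's own statement) =====
-- stated objective: simpler
-- what changed: B drops A's running PF/PC/estante counters: each cell's shelf number is computed directly from its coordinates by a closed-form rank (shelf_cols*rows_before + cols_upto), with aisles at i%5==0 or j%3==0.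
import Mathlib
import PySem

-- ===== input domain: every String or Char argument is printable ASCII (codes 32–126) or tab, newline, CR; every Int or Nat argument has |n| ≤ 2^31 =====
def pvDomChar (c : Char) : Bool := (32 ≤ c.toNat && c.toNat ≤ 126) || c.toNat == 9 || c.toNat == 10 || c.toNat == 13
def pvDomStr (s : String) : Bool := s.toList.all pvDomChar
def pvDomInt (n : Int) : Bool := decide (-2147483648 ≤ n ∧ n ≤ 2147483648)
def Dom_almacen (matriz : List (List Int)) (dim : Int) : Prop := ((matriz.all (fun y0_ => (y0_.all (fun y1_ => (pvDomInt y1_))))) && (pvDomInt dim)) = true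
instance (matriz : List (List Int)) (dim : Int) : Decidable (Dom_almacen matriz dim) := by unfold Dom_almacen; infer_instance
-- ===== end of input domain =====

-- B replaces A's running PF/PC/estante counters by a closed-form rank computed from each
-- cell's coordinates (objective: simpler). Both versions mutate matriz in place identically.

-- ===== PORT A =====
-- inner loop body: one j-step of A's nested loop (state: matriz, PC, estante; PF fixed per row)
def almacenInner (i : Nat) (PF : Int) (st : List (List Int) × Int × Int) (j : Nat) :
    List (List Int) × Int × Int :=
  let m := st.1
  let PC := st.2.1
  let estante := st.2.2
  let me : List (List Int) × Int :=
    if PF = 0 then (m.modify i (fun r => r.set j 0), estante)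
    else if PC = 0 then (m.modify i (fun r => r.set j 0), estante)
    else (m.modify i (fun r => r.set j (estante + 1)), estante + 1)
  let PC' := PC + 1
  (me.1, if PC' = 3 then 0 else PC', me.2)

-- outer loop body: one i-step (state: matriz, PF, PC, estante)
def almacenOuter (d : Nat) (st : List (List Int) × Int × Int × Int) (i : Nat) :
    List (List Int) × Int × Int × Int :=
  let m := st.1
  let PF := st.2.1
  let PC := st.2.2.1
  let estante := st.2.2.2
  let inner := (List.range d).foldl (almacenInner i PF) (m, PC, estante)
  let PF' := PF + 1
  (inner.1, if PF' = 5 then 0 else PF', 0, inner.2.2)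

def almacen (matriz : List (List Int)) (dim : Int) : List (List Int) :=
  let d := dim.toNat
  let m0 := matriz ++ List.replicate d (List.replicate d (0 : Int))
  ((List.range d).foldl (almacenOuter d) (m0, 0, 0, 0)).1

-- ===== PORT B =====
-- cell value of B: closed-form rank from the coordinates
def almacenCell (dim i j : Int) : Int :=
  if i % 5 = 0 ∨ j % 3 = 0 then 0
  else (dim - PySem.Int.floordiv (dim + 2) 3) * (i - PySem.Int.floordiv (i + 4) 5)
       + (j - PySem.Int.floordiv j 3)

def almacen_alt (matriz : List (List Int)) (dim : Int) : List (List Int) :=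
  let d := dim.toNat
  let m0 := matriz ++ List.replicate d (List.replicate d (0 : Int))
  (List.range d).foldl (fun m i =>
    (List.range d).foldl (fun m j =>
      m.modify i (fun r => r.set j (almacenCell dim (i : Int) (j : Int)))) m) m0

-- ===== PRECONDITION & SPEC =====
-- Pre_ excludes exactly the inputs on which the Python A raises IndexError: one of the
-- first dim pre-existing rows is shorter than dim, so the write matriz[i][j] is out of range.
def Pre_almacen (matriz : List (List Int)) (dim : Int) : Prop :=
  ∀ r ∈ matriz.take dim.toNat, dim ≤ (r.length : Int)
instance (matriz : List (List Int)) (dim : Int) : Decidable (Pre_almacen matriz dim) := by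
  unfold Pre_almacen; infer_instance
def pvWitness_almacen : List (List Int) × Int := ([[7, 8], [9, 1, 2]], 2)

def Spec_almacen (matriz : List (List Int)) (dim : Int) (out : List (List Int)) : Prop := out = almacen_alt matriz dim
instance (matriz : List (List Int)) (dim : Int) (out : List (List Int)) : Decidable (Spec_almacen matriz dim out) := by unfold Spec_almacen; infer_instance

-- ===== CLAIM (what is proved, stated in full; the proofs are below) =====
def Claim_equal_almacen : Prop := ∀ (matriz : List (List Int)) (dim : Int), Dom_almacen matriz dim → Pre_almacen matriz dim → Spec_almacen matriz dim (almacen matriz dim)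

-- ===== LEMMAS AND PROOFS =====

-- number of k-non-multiples below m
def cnt (k m : Nat) : Nat := (List.range m).countP (fun x => !(x % k == 0))

lemma cnt_succ (k m : Nat) : cnt k (m + 1) = cnt k m + (if m % k = 0 then 0 else 1) := by
  by_cases h : m % k = 0 <;>
    simp [cnt, List.range_succ, List.countP_append, h]

lemma cnt3_closed (m : Nat) : cnt 3 m = m - (m + 2) / 3 := by
  induction m with
  | zero => simp [cnt]
  | succ m ih => rw [cnt_succ, ih]; split_ifs with h <;> omega

lemma cnt5_closed (m : Nat) : cnt 5 m = m - (m + 4) / 5 := by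
  induction m with
  | zero => simp [cnt]
  | succ m ih => rw [cnt_succ, ih]; split_ifs with h <;> omega

-- value A writes at column j of a row with fixed PF and row-start shelf count e0
def valA (PF e0 : Int) (j : Nat) : Int :=
  if PF = 0 ∨ j % 3 = 0 then 0 else e0 + (cnt 3 (j + 1) : Int)

lemma pv_modify_modify {α : Type} (l : List α) (i : Nat) (f g : α → α) :
    (l.modify i f).modify i g = l.modify i (fun a => g (f a)) := by
  induction l generalizing i with
  | nil => simp
  | cons a t ih => cases i <;> simp [ih]

lemma inner_char (i : Nat) (PF : Int) (m : List (List Int)) (e0 : Int) (jm : Nat) :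
    (List.range jm).foldl (almacenInner i PF) (m, 0, e0)
      = ((List.range jm).foldl
            (fun (mm : List (List Int)) (j : Nat) => mm.modify i (fun r => r.set j (valA PF e0 j))) m,
         ((jm % 3 : Nat) : Int),
         e0 + (if PF = 0 then 0 else (cnt 3 jm : Int))) := by
  induction jm with
  | zero => simp [cnt]
  | succ jm ih =>
    rw [List.range_succ, List.foldl_append, List.foldl_append, ih]
    simp only [List.foldl_cons, List.foldl_nil]
    simp only [almacenInner]
    by_cases hPF : PF = 0
    · simp only [if_pos hPF, Prod.mk.injEq]
      refine ⟨?_, by omega, by simp⟩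
      congr 1; funext r; rw [valA]; rw [if_pos (Or.inl hPF)]
    · by_cases h3 : jm % 3 = 0
      · simp only [if_neg hPF, if_pos (show (((jm % 3 : Nat) : Int)) = 0 by omega), Prod.mk.injEq]
        refine ⟨?_, by omega, ?_⟩
        · congr 1; funext r; rw [valA]; rw [if_pos (Or.inr h3)]
        · rw [cnt_succ, if_pos h3]; omega
      · simp only [if_neg hPF, if_neg (show ¬(((jm % 3 : Nat) : Int)) = 0 by omega), Prod.mk.injEq]
        refine ⟨?_, by omega, ?_⟩
        · congr 1; funext r
          rw [valA, if_neg (by push_neg; exact ⟨hPF, h3⟩), cnt_succ, if_neg h3]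
          congr 1; push_cast; ring
        · rw [cnt_succ, if_neg h3]; push_cast; ring

lemma fold_modify_collapse (i : Nat) (g : Nat → List Int → List Int) (d : Nat) (m : List (List Int)) :
    (List.range d).foldl (fun mm j => mm.modify i (g j)) m
      = m.modify i (fun r => (List.range d).foldl (fun r j => g j r) r) := by
  induction d with
  | zero =>
    simp only [List.range_zero, List.foldl_nil]
    exact (List.modify_id _ _).symm
  | succ d ih =>
    simp only [List.range_succ, List.foldl_append, List.foldl_cons, List.foldl_nil]
    rw [ih, pv_modify_modify]

def rowF (d i : Nat) (r : List Int) : List Int :=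
  (List.range d).foldl (fun r j => r.set j (valA ((i % 5 : Nat) : Int) ((cnt 3 d * cnt 5 i : Nat) : Int) j)) r

lemma outer_char (d : Nat) (m0 : List (List Int)) (im : Nat) :
    (List.range im).foldl (almacenOuter d) (m0, 0, 0, 0)
      = ((List.range im).foldl (fun mm i => mm.modify i (rowF d i)) m0,
         ((im % 5 : Nat) : Int), 0, ((cnt 3 d * cnt 5 im : Nat) : Int)) := by
  induction im with
  | zero => simp [cnt]
  | succ im ih =>
    rw [List.range_succ, List.foldl_append, List.foldl_append, ih]
    simp only [List.foldl_cons, List.foldl_nil]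
    simp only [almacenOuter]
    rw [inner_char]
    simp only [Prod.mk.injEq]
    refine ⟨?_, by omega, trivial, ?_⟩
    · rw [fold_modify_collapse]; rfl
    · by_cases h5 : im % 5 = 0
      · rw [if_pos (show (((im % 5 : Nat) : Int)) = 0 by omega), cnt_succ, if_pos h5]
        push_cast; ring
      · rw [if_neg (show ¬(((im % 5 : Nat) : Int)) = 0 by omega), cnt_succ, if_neg h5]
        push_cast; ring

lemma valueEq (d i j : Nat) :
    valA ((i % 5 : Nat) : Int) ((cnt 3 d * cnt 5 i : Nat) : Int) j
      = almacenCell (d : Int) (i : Int) (j : Int) := by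
  have f3 : PySem.Int.floordiv ((d : Int) + 2) 3 = (((d + 2) / 3 : Nat) : Int) := by
    rw [show ((d : Int) + 2) = ((d + 2 : Nat) : Int) by push_cast; ring,
        show (3 : Int) = ((3 : Nat) : Int) by norm_num, PySem.Int.floordiv_natCast]
  have f5 : PySem.Int.floordiv ((i : Int) + 4) 5 = (((i + 4) / 5 : Nat) : Int) := by
    rw [show ((i : Int) + 4) = ((i + 4 : Nat) : Int) by push_cast; ring,
        show (5 : Int) = ((5 : Nat) : Int) by norm_num, PySem.Int.floordiv_natCast]
  have fj : PySem.Int.floordiv ((j : Int)) 3 = ((j / 3 : Nat) : Int) := by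
    rw [show (3 : Int) = ((3 : Nat) : Int) by norm_num, PySem.Int.floordiv_natCast]
  rw [valA, almacenCell, f3, f5, fj]
  by_cases hc : (i : Int) % 5 = 0 ∨ (j : Int) % 3 = 0
  · rw [if_pos (by omega), if_pos hc]
  · push_neg at hc
    rw [if_neg (by push_neg; constructor <;> omega), if_neg (by push_neg; exact hc)]
    rw [cnt3_closed, cnt5_closed, cnt3_closed]
    have e1 : ((d - (d + 2) / 3 : Nat) : Int) = (d : Int) - (((d + 2) / 3 : Nat) : Int) := by omega
    have e2 : ((i - (i + 4) / 5 : Nat) : Int) = (i : Int) - (((i + 4) / 5 : Nat) : Int) := by omega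
    have e3 : ((j + 1 - (j + 1 + 2) / 3 : Nat) : Int) = (j : Int) - ((j / 3 : Nat) : Int) := by omega
    rw [e3]
    push_cast [e1, e2]
    ring

-- ===== VERDICT (by name: the statement is the Claim_ definition above) =====
theorem almacen_spec : Claim_equal_almacen := by
  intro matriz dim _ _
  unfold Spec_almacen almacen almacen_alt
  dsimp only
  rw [outer_char]
  dsimp only
  by_cases hdim : dim ≤ 0
  · rw [show dim.toNat = 0 by omega]
    simp
  · obtain ⟨d, rfl⟩ : ∃ d : Nat, dim = (d : Int) := ⟨dim.toNat, by omega⟩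
    simp only [Int.toNat_natCast]
    apply PySem.List.foldl_congr_mem
    intro m i _
    rw [fold_modify_collapse]
    congr 1
    funext r
    unfold rowF
    apply PySem.List.foldl_congr_mem
    intro r' j _
    rw [valueEq]
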